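-- pv_equiv track=rewrite | github.com/yyytae0/algorithm-training | baekjoon/2231.py | check
-- ===== SOURCE A (Python) =====
-- def check(n, target):
--     total = n
--     while n != 0:
--         total = total + n%10
--         n = n//10
--
--     if total == target:
--         return True
--
--     else:
--         return False
-- ===== SOURCE B (Python) =====
-- def check(n, target):
--     return n + sum(int(c) for c in str(n)) == target
-- ===== Notes on version B (the rewrite author's own statement) =====
-- stated objective: idiomatic
-- what changed: Replaces the explicit %-and-// accumulator loop with the idiomatic one-liner that sums the digits of str(n) and compares directly; Pre_ excludes n < 0, where A loops forever (n//10 floors to -1) and B raises ValueError on the '-' character.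
import Mathlib
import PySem

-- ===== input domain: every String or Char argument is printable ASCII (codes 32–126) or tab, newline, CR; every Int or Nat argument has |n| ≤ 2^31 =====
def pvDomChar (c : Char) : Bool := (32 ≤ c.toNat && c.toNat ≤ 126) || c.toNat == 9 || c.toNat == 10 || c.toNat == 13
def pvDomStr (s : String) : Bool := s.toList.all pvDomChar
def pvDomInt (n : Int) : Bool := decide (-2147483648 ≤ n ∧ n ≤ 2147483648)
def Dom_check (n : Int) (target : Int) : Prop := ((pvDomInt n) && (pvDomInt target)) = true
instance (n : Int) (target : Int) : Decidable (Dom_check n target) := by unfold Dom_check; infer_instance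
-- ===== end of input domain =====

-- B replaces A's %-and-// digit accumulator loop with the idiomatic sum over the digit
-- characters of str(n); equivalence is claimed for 0 ≤ n (below 0 Python's A never returns).

-- ===== PORT A =====
-- the 'while n != 0' loop; the 'n < 0' guard only makes the recursion total in Lean —
-- for n < 0 Python's loop never terminates, and such n are excluded by Pre_check.
def checkLoop (n : Int) (total : Int) : Int :=
  if n = 0 then total
  else if n < 0 then total
  else checkLoop (PySem.Int.floordiv n 10) (total + PySem.Int.mod n 10)
termination_by n.toNat
decreasing_by
  rw [PySem.Int.floordiv_eq_ediv_of_pos (by omega)]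
  omega

def check (n : Int) (target : Int) : Bool :=
  if checkLoop n n = target then true else false

-- ===== PORT B =====
-- int(c) for a single character c is PySem.Int.ofChars? [c]; under Pre_check every character
-- of str(n) is a decimal digit, so the 'getD 0' default (Python: ValueError) is never taken.
def check_alt (n : Int) (target : Int) : Bool :=
  n + ((PySem.Int.toChars n).map (fun c => (PySem.Int.ofChars? [c]).getD 0)).sum = target

-- ===== PRECONDITION & SPEC =====
-- Pre_ excludes n < 0: there A's while-loop never terminates (n//10 stabilises at -1), so A
-- returns on exactly the inputs with 0 ≤ n.
def Pre_check (n : Int) (target : Int) : Prop := 0 ≤ n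
instance (n : Int) (target : Int) : Decidable (Pre_check n target) := by unfold Pre_check; infer_instance
def pvWitness_check : Int × Int := (198, 216)

def Spec_check (n : Int) (target : Int) (out : Bool) : Prop := out = check_alt n target
instance (n : Int) (target : Int) (out : Bool) : Decidable (Spec_check n target out) := by unfold Spec_check; infer_instance

-- ===== CLAIM (what is proved, stated in full; the proofs are below) =====
def Claim_equal_check : Prop := ∀ (n : Int) (target : Int), Dom_check n target → Pre_check n target → Spec_check n target (check n target)

-- ===== LEMMAS AND PROOFS =====

-- decimal digit sum of a natural number
def digSum (m : Nat) : Int :=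
  if m = 0 then 0 else ((m % 10 : Nat) : Int) + digSum (m / 10)

lemma digSum_pos (m : Nat) (hm : m ≠ 0) : digSum m = ((m % 10 : Nat) : Int) + digSum (m / 10) := by
  rw [digSum]; simp [hm]

lemma checkLoop_eq (k : Nat) (total : Int) :
    checkLoop (k : Int) total = total + digSum k := by
  induction k using Nat.strong_induction_on generalizing total with
  | _ k ih =>
    rw [checkLoop]
    by_cases hk : k = 0
    · subst hk; simp [digSum]
    · have h0 : (k : Int) ≠ 0 := by exact_mod_cast hk
      have hneg : ¬ ((k : Int) < 0) := by omega
      have hfd : PySem.Int.floordiv (k : Int) 10 = ((k / 10 : Nat) : Int) := by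
        exact_mod_cast PySem.Int.floordiv_natCast k 10
      have hmd : PySem.Int.mod (k : Int) 10 = ((k % 10 : Nat) : Int) := by
        exact_mod_cast PySem.Int.mod_natCast k 10
      rw [if_neg h0, if_neg hneg, hfd, hmd,
        ih (k / 10) (Nat.div_lt_self (Nat.pos_of_ne_zero hk) (by omega)),
        digSum_pos k hk]
      ring

lemma digitVal_digitChar (d : Nat) (hd : d < 10) :
    (PySem.Int.ofChars? [Nat.digitChar d]).getD 0 = (d : Int) := by
  interval_cases d <;> decide

lemma charSum_toDigitsCore (fuel m : Nat) (acc : List Char) (hfuel : m < fuel) :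
    ((Nat.toDigitsCore 10 fuel m acc).map (fun c => (PySem.Int.ofChars? [c]).getD 0)).sum
      = digSum m + (acc.map (fun c => (PySem.Int.ofChars? [c]).getD 0)).sum := by
  induction fuel generalizing m acc with
  | zero => omega
  | succ f ih =>
    rw [Nat.toDigitsCore]
    by_cases hdiv : m / 10 = 0
    · simp only [hdiv, if_true, List.map_cons, List.sum_cons,
        digitVal_digitChar (m % 10) (Nat.mod_lt _ (by omega))]
      by_cases hm : m = 0
      · subst hm; simp [digSum]
      · rw [digSum_pos m hm, hdiv, digSum]; simp
    · have hm : m ≠ 0 := by intro h; subst h; simp at hdiv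
      simp only [hdiv, if_false]
      rw [ih (m / 10) _ (by omega)]
      simp only [List.map_cons, List.sum_cons,
        digitVal_digitChar (m % 10) (Nat.mod_lt _ (by omega))]
      rw [digSum_pos m hm]
      ring

lemma charSum_toChars (k : Nat) :
    (((PySem.Int.toChars (k : Int)).map (fun c => (PySem.Int.ofChars? [c]).getD 0)).sum)
      = digSum k := by
  have hneg : ¬ ((k : Int) < 0) := by omega
  rw [PySem.Int.toChars]
  simp only [hneg, if_false]
  rw [Nat.toDigits, Int.toNat_natCast,
    charSum_toDigitsCore (k + 1) k [] (by omega)]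
  simp

-- ===== VERDICT (by name: the statement is the Claim_ definition above) =====
theorem check_spec : Claim_equal_check := by
  intro n target _ hpre
  unfold Spec_check check check_alt
  obtain ⟨k, rfl⟩ : ∃ k : Nat, n = (k : Int) := ⟨n.toNat, (Int.toNat_of_nonneg hpre).symm⟩
  rw [checkLoop_eq k k, charSum_toChars k]
  by_cases h : (k : Int) + digSum k = target <;> simp [h]
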